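-- pv_equiv track=rewrite | github.com/Welian95/Energy_Monitor | Main.py | map_consumption_values
-- ===== SOURCE A (Python) =====
-- def flatten_data_mapping(data_mapping: dict) -> dict:
--     """Flatten a nested dictionary into a single-level dictionary.
--
--     Parameters
--     ----------
--     data_mapping : dict
--         A nested dictionary to be flattened.
--
--     Returns
--     -------
--     dict
--         A single-level dictionary.
--     """
--     flat_data_mapping = {}
--     for main_key, sub_dict in data_mapping.items():
--         flat_data_mapping.update(sub_dict)
--     return flat_data_mapping
--
-- def map_consumption_values(data_mapping: dict, sankey_mapping: dict) -> dict:
--     """Maps the 'Consumption' values in sankey_mapping using the values from data_mapping.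
--     Also includes units in the keys of the sankey_mapping.
--
--     Parameters
--     ----------
--     data_mapping : dict
--         A dictionary containing the mapping between data fields and their labels.
--     sankey_mapping : dict
--         A dictionary defining Sankey diagram attributes like 'Label', 'Consumption', etc.
--
--     Returns
--     -------
--     dict
--         The updated sankey_mapping with 'Consumption' values and units in keys.
--     """
--     flat_data_mapping = flatten_data_mapping(data_mapping)
--     new_sankey_mapping = {}
--
--     for sankey_key, attributes in sankey_mapping.items():
--         new_attributes = attributes.copy()
--
--         if attributes['Consumption'] is None:
--             for sub_key, sub_value in flat_data_mapping.items():
--                 clean_sub_key = sub_key.split('_[')[0]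
--                 if clean_sub_key == sankey_key:
--                     new_attributes['Consumption'] = sub_value
--                     unit = sub_key.split('_[')[1][:-1] if '_[' in sub_key else ''
--                     new_key = f"{sankey_key}_[{unit}]" if unit else sankey_key
--                     new_sankey_mapping[new_key] = new_attributes
--                     break
--             else:
--                 new_sankey_mapping[sankey_key] = new_attributes
--
--         else:
--             expression = attributes['Consumption']
--             for sub_key, sub_value in flat_data_mapping.items():
--                 clean_sub_key = sub_key.split('_[')[0]
--                 expression = expression.replace(clean_sub_key, sub_value)
--             new_attributes['Consumption'] = expression
--             new_sankey_mapping[sankey_key] = new_attributes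
--
--     return new_sankey_mapping
-- ===== SOURCE B (Python) =====
-- def map_consumption_values(data_mapping: dict, sankey_mapping: dict) -> dict:
--     # Flatten once (later duplicate sub_keys overwrite, as dict.update does).
--     flat_data_mapping = {k: v for sub in data_mapping.values() for k, v in sub.items()}
--
--     # Index: clean key -> (ready-made new key, value), first occurrence wins.
--     index = {}
--     for sub_key, sub_value in flat_data_mapping.items():
--         clean = sub_key.split('_[')[0]
--         if clean not in index:
--             unit = sub_key.split('_[')[1][:-1] if '_[' in sub_key else ''
--             index[clean] = (f"{clean}_[{unit}]" if unit else clean, sub_value)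
--
--     new_sankey_mapping = {}
--     for sankey_key, attributes in sankey_mapping.items():
--         new_attributes = dict(attributes)
--         consumption = attributes['Consumption']
--         if consumption is None:
--             if sankey_key in index:
--                 new_key, value = index[sankey_key]
--                 new_attributes['Consumption'] = value
--                 new_sankey_mapping[new_key] = new_attributes
--             else:
--                 new_sankey_mapping[sankey_key] = new_attributes
--         else:
--             for sub_key, sub_value in flat_data_mapping.items():
--                 consumption = consumption.replace(sub_key.split('_[')[0], sub_value)
--             new_attributes['Consumption'] = consumption
--             new_sankey_mapping[sankey_key] = new_attributes
--     return new_sankey_mapping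
-- ===== Notes on version B (the rewrite author's own statement) =====
-- stated objective: alternative
-- what changed: B builds a first-occurrence index dict (clean sub-key -> ready-made new key and value) in one pass over the flattened data mapping, so each None-'Consumption' entry is resolved by a single dict lookup instead of A's inner scan-with-break over the whole flat mapping; the expression branch is unchanged.
import Mathlib
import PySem

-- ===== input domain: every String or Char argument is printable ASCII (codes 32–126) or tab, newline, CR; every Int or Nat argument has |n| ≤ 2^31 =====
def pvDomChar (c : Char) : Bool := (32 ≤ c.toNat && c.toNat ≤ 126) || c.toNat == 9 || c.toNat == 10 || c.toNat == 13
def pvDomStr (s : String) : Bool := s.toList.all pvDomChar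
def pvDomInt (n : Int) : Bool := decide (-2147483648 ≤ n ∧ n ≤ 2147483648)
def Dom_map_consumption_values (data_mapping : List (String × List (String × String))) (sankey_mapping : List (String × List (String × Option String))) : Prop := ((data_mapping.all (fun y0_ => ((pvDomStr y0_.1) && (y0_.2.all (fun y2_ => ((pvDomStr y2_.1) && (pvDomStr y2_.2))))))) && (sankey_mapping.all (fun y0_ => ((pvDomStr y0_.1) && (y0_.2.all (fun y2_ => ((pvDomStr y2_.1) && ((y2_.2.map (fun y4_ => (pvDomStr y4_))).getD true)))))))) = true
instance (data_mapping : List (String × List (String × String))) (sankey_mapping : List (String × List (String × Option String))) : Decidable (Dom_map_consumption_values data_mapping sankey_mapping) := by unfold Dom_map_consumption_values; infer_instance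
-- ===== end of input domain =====

-- B precomputes a first-occurrence index of the flattened data mapping keyed by the clean sub-key,
-- replacing A's inner scan-with-break per None 'Consumption' by a single dict lookup (objective: alternative index-based traversal).

-- ===== PORT A =====
-- shared string helpers: both Pythons compute sub_key.split('_[')[0], the unit and the decorated key identically
def cleanKey (k : String) : String := ((PySem.Str.split? k "_[").getD []).headD ""

def unitOf (k : String) : String :=
  if PySem.Str.isIn "_[" k then
    String.ofList ((((PySem.Str.split? k "_[").getD []).getD 1 "").toList.dropLast)  -- split('_[')[1][:-1]
  else ""

def newKeyOf (sk u : String) : String := if u ≠ "" then sk ++ "_[" ++ u ++ "]" else sk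

-- attributes['Consumption'] as first-match lookup; none = Python KeyError (excluded by Pre_)
def consumptionOf (attrs : List (String × Option String)) : Option (Option String) :=
  (attrs.find? (fun q => q.1 == "Consumption")).map (·.2)

-- expression.replace applied sequentially over flat_data_mapping.items() (identical in both Pythons)
def replaceAll (flat : List (String × String)) (e : String) : String :=
  flat.foldl (fun e p => PySem.Str.replace e (cleanKey p.1) p.2) e

-- flatten_data_mapping: flat_data_mapping.update(sub_dict) for each sub dict
def flattenA (dm : List (String × List (String × String))) : PySem.Dict String String :=
  dm.foldl (fun d p => p.2.foldl (fun d q => d.insert q.1 q.2) d) PySem.Dict.empty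

-- A's inner 'for sub_key, sub_value in flat_data_mapping.items(): … break / else'
def scanA (flat : List (String × String)) (sankeyKey : String)
    (nd : PySem.Dict String (Option String))
    (acc : PySem.Dict String (List (String × Option String))) :
    PySem.Dict String (List (String × Option String)) :=
  match flat with
  | [] => acc.insert sankeyKey nd.items
  | (sk, sv) :: rest =>
    if cleanKey sk == sankeyKey then
      acc.insert (newKeyOf sankeyKey (unitOf sk)) ((nd.insert "Consumption" (some sv)).items)
    else scanA rest sankeyKey nd acc

def map_consumption_values (data_mapping : List (String × List (String × String))) (sankey_mapping : List (String × List (String × Option String))) : List (String × List (String × Option String)) :=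
  let flat := flattenA data_mapping
  (sankey_mapping.foldl (fun acc p =>
    let nd := PySem.Dict.ofList p.2          -- attributes.copy()
    match consumptionOf p.2 with
    | none => acc                            -- Python raises KeyError here (outside Pre_)
    | some none => scanA flat.items p.1 nd acc
    | some (some e) =>
        acc.insert p.1 ((nd.insert "Consumption" (some (replaceAll flat.items e))).items))
    PySem.Dict.empty).items

-- ===== PORT B =====
-- flatten as the dict comprehension {k: v for sub in data_mapping.values() for k, v in sub.items()}
def flattenB (dm : List (String × List (String × String))) : PySem.Dict String String :=
  (dm.flatMap (·.2)).foldl (fun d q => d.insert q.1 q.2) PySem.Dict.empty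

-- first-occurrence index: clean key -> (ready-made new key, value)
def buildIndex (flat : List (String × String)) : PySem.Dict String (String × String) :=
  flat.foldl (fun d p =>
    if d.contains (cleanKey p.1) then d
    else d.insert (cleanKey p.1) (newKeyOf (cleanKey p.1) (unitOf p.1), p.2))
    PySem.Dict.empty

def map_consumption_values_alt (data_mapping : List (String × List (String × String))) (sankey_mapping : List (String × List (String × Option String))) : List (String × List (String × Option String)) :=
  let flat := flattenB data_mapping
  let idx := buildIndex flat.items
  (sankey_mapping.foldl (fun acc p =>
    let nd := PySem.Dict.ofList p.2          -- dict(attributes)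
    match consumptionOf p.2 with
    | none => acc                            -- Python raises KeyError here (outside Pre_)
    | some none =>
        match idx.get? p.1 with
        | some (nk, v) => acc.insert nk ((nd.insert "Consumption" (some v)).items)
        | none => acc.insert p.1 nd.items
    | some (some e) =>
        acc.insert p.1 ((nd.insert "Consumption" (some (replaceAll flat.items e))).items))
    PySem.Dict.empty).items

-- ===== PRECONDITION & SPEC =====
-- Pre_ excludes exactly the inputs where Python A raises KeyError: some attributes dict lacks the key 'Consumption'.
def Pre_map_consumption_values (data_mapping : List (String × List (String × String))) (sankey_mapping : List (String × List (String × Option String))) : Prop :=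
  ∀ p ∈ sankey_mapping, ∃ q ∈ p.2, q.1 = "Consumption"
instance (data_mapping : List (String × List (String × String))) (sankey_mapping : List (String × List (String × Option String))) : Decidable (Pre_map_consumption_values data_mapping sankey_mapping) := by unfold Pre_map_consumption_values; infer_instance

def pvWitness_map_consumption_values : (List (String × List (String × String))) × (List (String × List (String × Option String))) :=
  ([("src", [("Heat_[kW]", "7")])], [("Heat", [("Consumption", none)]), ("X", [("Consumption", some "Heat+1")])])

def Spec_map_consumption_values (data_mapping : List (String × List (String × String))) (sankey_mapping : List (String × List (String × Option String))) (out : List (String × List (String × Option String))) : Prop := out = map_consumption_values_alt data_mapping sankey_mapping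
instance (data_mapping : List (String × List (String × String))) (sankey_mapping : List (String × List (String × Option String))) (out : List (String × List (String × Option String))) : Decidable (Spec_map_consumption_values data_mapping sankey_mapping out) := by unfold Spec_map_consumption_values; infer_instance

-- ===== CLAIM (what is proved, stated in full; the proofs are below) =====
def Claim_equal_map_consumption_values : Prop := ∀ (data_mapping : List (String × List (String × String))) (sankey_mapping : List (String × List (String × Option String))), Dom_map_consumption_values data_mapping sankey_mapping → Pre_map_consumption_values data_mapping sankey_mapping → Spec_map_consumption_values data_mapping sankey_mapping (map_consumption_values data_mapping sankey_mapping)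

-- ===== LEMMAS AND PROOFS =====

-- the two flattenings coincide
theorem flatten_eq (dm : List (String × List (String × String))) : flattenA dm = flattenB dm := by
  unfold flattenA flattenB
  generalize (PySem.Dict.empty : PySem.Dict String String) = d
  induction dm generalizing d with
  | nil => rfl
  | cons a l ih => simp [List.foldl_append, ih]

-- the index, read at k, is the first flat entry whose clean key is k
theorem buildIndex_get (l : List (String × String)) (d : PySem.Dict String (String × String)) (k : String) :
    (l.foldl (fun d p =>
      if d.contains (cleanKey p.1) then d
      else d.insert (cleanKey p.1) (newKeyOf (cleanKey p.1) (unitOf p.1), p.2)) d).get? k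
    = if d.contains k then d.get? k
      else (l.find? (fun p => cleanKey p.1 == k)).map
             (fun p => (newKeyOf (cleanKey p.1) (unitOf p.1), p.2)) := by
  induction l generalizing d with
  | nil => by_cases h : d.contains k = true <;> simp [PySem.Dict.get?_eq_none_iff_contains, *]
  | cons a l ih =>
    simp only [List.foldl_cons, List.find?]
    by_cases hc : d.contains (cleanKey a.1) = true
    · rw [if_pos hc, ih]
      by_cases hk : cleanKey a.1 = k
      · subst hk; simp [hc]
      · simp [show (cleanKey a.1 == k) = false by simp [hk]]
    · rw [if_neg hc, ih]
      rw [PySem.Dict.contains_insert, PySem.Dict.get?_insert]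
      by_cases hk : k = cleanKey a.1
      · subst hk; simp [hc]
      · have hbk : (k == cleanKey a.1) = false := by simp [hk]
        simp only [hbk, Bool.false_or, if_neg hk]
        by_cases hdk : d.contains k = true
        · simp [hdk]
        · simp [hdk, show (cleanKey a.1 == k) = false by simp [Ne.symm hk]]

-- A's scan-with-break, expressed through find?
theorem scanA_eq (l : List (String × String)) (sk : String)
    (nd : PySem.Dict String (Option String)) (acc : PySem.Dict String (List (String × Option String))) :
    scanA l sk nd acc
    = match l.find? (fun p => cleanKey p.1 == sk) with
      | some p => acc.insert (newKeyOf sk (unitOf p.1)) ((nd.insert "Consumption" (some p.2)).items)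
      | none => acc.insert sk nd.items := by
  induction l with
  | nil => rfl
  | cons a l ih =>
    rcases a with ⟨ak, av⟩
    simp only [scanA, List.find?]
    by_cases h : cleanKey ak = sk
    · simp [h]
    · simp [show (cleanKey ak == sk) = false by simp [h], ih]

-- A's scan equals B's index lookup
theorem scan_eq_lookup (l : List (String × String)) (sk : String)
    (nd : PySem.Dict String (Option String)) (acc : PySem.Dict String (List (String × Option String))) :
    scanA l sk nd acc
    = match (buildIndex l).get? sk with
      | some (nk, v) => acc.insert nk ((nd.insert "Consumption" (some v)).items)
      | none => acc.insert sk nd.items := by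
  rw [scanA_eq]
  have hidx := buildIndex_get l PySem.Dict.empty sk
  unfold buildIndex
  rw [hidx]
  simp only [PySem.Dict.contains_empty, PySem.Dict.get?_empty, Bool.false_eq_true, if_false]
  cases hf : l.find? (fun p => cleanKey p.1 == sk) with
  | none => simp
  | some p =>
    have : cleanKey p.1 = sk := by
      have := List.find?_some hf
      simpa using this
    simp [this]

-- ===== VERDICT (by name: the statement is the Claim_ definition above) =====
theorem map_consumption_values_spec : Claim_equal_map_consumption_values := by
  intro dm sm _ _
  unfold Spec_map_consumption_values map_consumption_values map_consumption_values_alt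
  rw [flatten_eq]
  dsimp only
  congr 1
  apply PySem.List.foldl_congr_mem
  intro acc p _
  cases consumptionOf p.2 with
  | none => rfl
  | some c =>
    cases c with
    | none => simp only [scan_eq_lookup]
    | some e => rfl
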